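-- pv_equiv track=rewrite | github.com/ostadsgo/tktable | rfile.py | event_sorter
-- ===== SOURCE A (Python) =====
-- def event_sorter(dict_data, event_list):
--     for g in dict_data:
--         for dirs in dict_data.get(g):
--             a_dict = dict_data[g][dirs]
--             sorted_keys = sorted(
--                 a_dict.keys(),
--                 key=lambda x: event_list.index(x)
--                 if x in event_list
--                 else float("inf"),
--             )
--             sorted_dict = {key: a_dict[key] for key in sorted_keys}
--             dict_data[g][dirs] = sorted_dict
--     return dict_data
-- ===== SOURCE B (Python) =====
-- def event_sorter(dict_data, event_list):
--     # Same in-place update of dict_data as the original (return value proved equal).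
--     for g in dict_data:
--         for dirs in dict_data[g]:
--             a_dict = dict_data[g][dirs]
--             result = {}
--             for ev in event_list:
--                 if ev in a_dict and ev not in result:
--                     result[ev] = a_dict[ev]
--             for key, value in a_dict.items():
--                 if key not in result:
--                     result[key] = value
--             dict_data[g][dirs] = result
--     return dict_data
-- ===== Notes on version B (the rewrite author's own statement) =====
-- stated objective: alternative
-- what changed: Replaces the comparison sort keyed by event_list.index (with a float('inf') fallback) by a two-pass scatter/gather: one scan over event_list placing the keys it contains, then one scan over the dict appending the remaining keys in their original order.
import Mathlib
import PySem

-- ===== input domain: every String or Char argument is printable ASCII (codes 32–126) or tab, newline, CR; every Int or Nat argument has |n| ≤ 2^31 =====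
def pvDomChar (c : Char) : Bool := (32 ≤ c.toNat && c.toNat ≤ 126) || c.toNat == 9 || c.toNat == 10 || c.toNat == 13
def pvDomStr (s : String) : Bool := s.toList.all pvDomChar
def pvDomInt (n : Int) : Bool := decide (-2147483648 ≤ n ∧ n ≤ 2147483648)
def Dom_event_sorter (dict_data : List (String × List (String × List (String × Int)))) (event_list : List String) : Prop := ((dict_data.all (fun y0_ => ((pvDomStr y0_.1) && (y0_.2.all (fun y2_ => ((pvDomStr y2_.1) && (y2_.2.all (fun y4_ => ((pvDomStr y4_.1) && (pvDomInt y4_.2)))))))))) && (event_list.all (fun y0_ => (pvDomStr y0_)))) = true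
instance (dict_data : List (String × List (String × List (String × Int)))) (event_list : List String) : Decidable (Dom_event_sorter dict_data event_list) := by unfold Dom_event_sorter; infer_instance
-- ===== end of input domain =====

-- B replaces the comparison sort on event_list.index by a two-pass scatter/gather over
-- event_list and the dict; A mutates dict_data in place and B performs the same mutation,
-- the theorems below are about the (identical) return value.

-- ===== PORT A =====
-- sorted()'s key 'event_list.index(x) if x in event_list else float("inf")':
-- WithTop Nat models ints-plus-infinity exactly (⊤ = float("inf")).
def pvKeyA (el : List String) (x : String) : WithTop Nat :=
  if x ∈ el then (((PySem.List.index? el x).getD 0 : Nat) : WithTop Nat) else ⊤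
-- (index? returns some here whenever 'x ∈ el', so getD's default 0 is never used)

-- one inner dict: sorted_keys then the dict comprehension {key: a_dict[key] for key in sorted_keys}
-- (key is always a key of a_dict, so a_dict[key] cannot raise; getD's default 0 is never used)
def pvSortInner (el : List String) (d : List (String × Int)) : List (String × Int) :=
  let sortedKeys := PySem.List.sorted (d.map (·.1)) (pvKeyA el) false
  (sortedKeys.foldl (fun (acc : PySem.Dict String Int) k =>
      acc.insert k (PySem.Dict.getD ⟨d⟩ k 0)) PySem.Dict.empty).items

def event_sorter (dict_data : List (String × List (String × List (String × Int)))) (event_list : List String) : List (String × List (String × List (String × Int))) :=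
  dict_data.map (fun p => (p.1, p.2.map (fun q => (q.1, pvSortInner event_list q.2))))

-- ===== PORT B =====
-- one inner dict: first scatter pass over event_list, then gather pass over a_dict's items
def pvScatterInner (el : List String) (d : List (String × Int)) : List (String × Int) :=
  let a : PySem.Dict String Int := ⟨d⟩
  let r1 := el.foldl (fun (r : PySem.Dict String Int) ev =>
      if a.contains ev && !(r.contains ev) then r.insert ev (a.getD ev 0) else r) PySem.Dict.empty
  (d.foldl (fun (r : PySem.Dict String Int) kv =>
      if !(r.contains kv.1) then r.insert kv.1 kv.2 else r) r1).items

def event_sorter_alt (dict_data : List (String × List (String × List (String × Int)))) (event_list : List String) : List (String × List (String × List (String × Int))) :=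
  dict_data.map (fun p => (p.1, p.2.map (fun q => (q.1, pvScatterInner event_list q.2))))

-- ===== PRECONDITION & SPEC =====
-- Pre_ only requires that the association lists really encode Python dicts: keys are
-- unique at every dict level (a list with duplicate keys is the image of no Python input).
def Pre_event_sorter (dict_data : List (String × List (String × List (String × Int)))) (event_list : List String) : Prop :=
  (dict_data.map (·.1)).Nodup ∧
    ∀ p ∈ dict_data, (p.2.map (·.1)).Nodup ∧ ∀ q ∈ p.2, (q.2.map (·.1)).Nodup
instance (dict_data : List (String × List (String × List (String × Int)))) (event_list : List String) : Decidable (Pre_event_sorter dict_data event_list) := by unfold Pre_event_sorter; infer_instance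

def pvWitness_event_sorter : (List (String × List (String × List (String × Int)))) × List String :=
  ([("g", [("d", [("a", (1 : Int)), ("b", 2)])])], ["b", "c"])

def Spec_event_sorter (dict_data : List (String × List (String × List (String × Int)))) (event_list : List String) (out : List (String × List (String × List (String × Int)))) : Prop := out = event_sorter_alt dict_data event_list
instance (dict_data : List (String × List (String × List (String × Int)))) (event_list : List String) (out : List (String × List (String × List (String × Int)))) : Decidable (Spec_event_sorter dict_data event_list out) := by unfold Spec_event_sorter; infer_instance

-- ===== CLAIM (what is proved, stated in full; the proofs are below) =====
def Claim_equal_event_sorter : Prop := ∀ (dict_data : List (String × List (String × List (String × Int)))) (event_list : List String), Dom_event_sorter dict_data event_list → Pre_event_sorter dict_data event_list → Spec_event_sorter dict_data event_list (event_sorter dict_data event_list)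

-- ===== LEMMAS AND PROOFS =====

theorem pv_insertBy_cons (before : String → String → Bool) (x y : String) (ys : List String) :
    PySem.List.insertBy before x (y :: ys)
      = if before x y then x :: y :: ys else y :: PySem.List.insertBy before x ys := rfl

theorem pv_insertBy_append (before : String → String → Bool) (x : String) (A S : List String)
    (h : ∀ a ∈ A, before x a = false) :
    PySem.List.insertBy before x (A ++ S) = A ++ PySem.List.insertBy before x S := by
  induction A with
  | nil => rfl
  | cons a A ih =>
      simp only [List.cons_append, pv_insertBy_cons, h a List.mem_cons_self, if_neg Bool.false_ne_true]
      simp [ih (fun b hb => h b (List.mem_cons_of_mem a hb))]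

theorem pv_insertBy_congr (b1 b2 : String → String → Bool) (x : String) (l : List String)
    (h : ∀ y ∈ l, b1 x y = b2 x y) :
    PySem.List.insertBy b1 x l = PySem.List.insertBy b2 x l := by
  induction l with
  | nil => rfl
  | cons y ys ih =>
      rw [pv_insertBy_cons, pv_insertBy_cons, h y List.mem_cons_self,
        ih (fun z hz => h z (List.mem_cons_of_mem y hz))]

theorem pv_sorted_snoc (ks : List String) (y : String) (key : String → WithTop Nat) :
    PySem.List.sorted (ks ++ [y]) key false
      = PySem.List.insertBy (fun a b => decide (key a < key b)) y (PySem.List.sorted ks key false) := by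
  rw [PySem.List.sorted_eq_foldl_insertBy, PySem.List.sorted_eq_foldl_insertBy, List.foldl_append]
  rfl

theorem pv_stable_split (key : String → WithTop Nat) (e : String)
    (hmin : ∀ x, x ≠ e → key e < key x) (ks : List String) :
    PySem.List.sorted ks key false
      = ks.filter (fun x => decide (x = e))
          ++ PySem.List.sorted (ks.filter (fun x => decide (x ≠ e))) key false := by
  induction ks using List.reverseRecOn with
  | nil => rfl
  | append_singleton ks y ih =>
      rw [pv_sorted_snoc, ih, List.filter_append, List.filter_append]
      have hA : ∀ a ∈ ks.filter (fun x => decide (x = e)), a = e := by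
        intro a ha
        simpa using (List.of_mem_filter ha)
      by_cases hy : y = e
      · subst hy
        rw [pv_insertBy_append _ _ _ _ (fun a ha => by simp [hA a ha])]
        have hS : PySem.List.insertBy (fun a b => decide (key a < key b)) y
            (PySem.List.sorted (ks.filter (fun x => decide (x ≠ y))) key false)
            = y :: PySem.List.sorted (ks.filter (fun x => decide (x ≠ y))) key false := by
          cases hS : PySem.List.sorted (ks.filter (fun x => decide (x ≠ y))) key false with
          | nil => rfl
          | cons z zs =>
              have hz : z ∈ ks.filter (fun x => decide (x ≠ y)) := by
                rw [← PySem.List.mem_sorted _ key false, hS]; exact List.mem_cons_self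
              have hzy : z ≠ y := by simpa using (List.of_mem_filter hz)
              rw [pv_insertBy_cons, if_pos (by simpa using hmin z hzy)]
        rw [hS]
        simp
      · rw [pv_insertBy_append _ _ _ _ (fun a ha => by
          have := hmin y hy
          simp [hA a ha, not_lt_of_gt this])]
        rw [← pv_sorted_snoc]
        simp [hy]

theorem pv_sorted_congr (key1 key2 : String → WithTop Nat) (ks : List String)
    (h : ∀ a ∈ ks, ∀ b ∈ ks, (key1 a < key1 b ↔ key2 a < key2 b)) :
    PySem.List.sorted ks key1 false = PySem.List.sorted ks key2 false := by
  induction ks using List.reverseRecOn with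
  | nil => rfl
  | append_singleton ks y ih =>
      have hsub : ∀ a ∈ ks, a ∈ ks ++ [y] := fun a ha => List.mem_append_left _ ha
      rw [pv_sorted_snoc, pv_sorted_snoc,
        ih (fun a ha b hb => h a (hsub a ha) b (hsub b hb))]
      exact pv_insertBy_congr _ _ _ _ (fun z hz => by
        have hzks : z ∈ ks := (PySem.List.mem_sorted _ _ _ _).mp hz
        have := h y (List.mem_append_right _ List.mem_cons_self) z (hsub z hzks)
        simp [this])

theorem pvKeyA_nil (x : String) : pvKeyA [] x = ⊤ := by simp [pvKeyA]

theorem pvKeyA_cons_self (e : String) (el : List String) :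
    pvKeyA (e :: el) e = ((0 : Nat) : WithTop Nat) := by
  rw [pvKeyA, if_pos List.mem_cons_self, PySem.List.index?_cons_self]
  rfl

theorem pvKeyA_cons_of_ne (e x : String) (el : List String) (h : x ≠ e) :
    pvKeyA (e :: el) x = 1 + pvKeyA el x := by
  by_cases hx : x ∈ el
  · obtain ⟨i, hi⟩ := Option.isSome_iff_exists.mp ((PySem.List.index?_isSome_iff el x).mpr hx)
    rw [pvKeyA, pvKeyA, if_pos (List.mem_cons_of_mem e hx), if_pos hx,
      PySem.List.index?_cons_of_ne el (Ne.symm h), hi]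
    simp only [Option.map_some, Option.getD_some]
    push_cast
    ring
  · have hx2 : x ∉ e :: el := by simp [List.mem_cons, hx, h]
    rw [pvKeyA, pvKeyA, if_neg hx2, if_neg hx]
    rw [WithTop.add_top]

theorem pvKeyA_min (e x : String) (el : List String) (h : x ≠ e) :
    pvKeyA (e :: el) e < pvKeyA (e :: el) x := by
  rw [pvKeyA_cons_self, pvKeyA_cons_of_ne e x el h]
  cases k : pvKeyA el x with
  | top => simp
  | coe n =>
      exact lt_of_lt_of_le (by norm_num) le_self_add

-- e ∉ filter (x ≠ e), and nodup filter of equality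
theorem pv_filter_eq_of_nodup (ks : List String) (e : String) (hnd : ks.Nodup) :
    ks.filter (fun x => decide (x = e)) = if e ∈ ks then [e] else [] := by
  have : (fun x => decide (x = e)) = (fun x => x == e) := by
    funext x; by_cases hx : x = e <;> simp [hx]
  rw [this, List.filter_beq]
  by_cases h : e ∈ ks
  · rw [List.count_eq_one_of_mem hnd h]; simp [h]
  · rw [List.count_eq_zero_of_not_mem h]; simp [h]

-- characterization of A's stable sort: keys of event_list first (first occurrences, in
-- event_list order), then the remaining keys in their original order
theorem pv_sorted_char (el ks : List String) (hnd : ks.Nodup) :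
    PySem.List.sorted ks (pvKeyA el) false
      = (PySem.List.dedup el).filter (fun e => decide (e ∈ ks))
          ++ ks.filter (fun k => decide (k ∉ el)) := by
  induction el generalizing ks with
  | nil =>
      have h1 : PySem.List.sorted ks (pvKeyA []) false = ks := by
        apply PySem.List.sorted_eq_self_of_pairwise
        exact List.pairwise_of_forall (fun a b => by simp [pvKeyA_nil])
      rw [h1]
      simp
  | cons e el ih =>
      rw [pv_stable_split (pvKeyA (e :: el)) e (fun x hx => pvKeyA_min e x el hx)]
      have hcong : PySem.List.sorted (ks.filter (fun x => decide (x ≠ e))) (pvKeyA (e :: el)) false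
          = PySem.List.sorted (ks.filter (fun x => decide (x ≠ e))) (pvKeyA el) false := by
        apply pv_sorted_congr
        intro a ha b hb
        have ha' : a ≠ e := by simpa using List.of_mem_filter ha
        have hb' : b ≠ e := by simpa using List.of_mem_filter hb
        rw [pvKeyA_cons_of_ne e a el ha', pvKeyA_cons_of_ne e b el hb']
        exact WithTop.add_lt_add_iff_left (by simp)
      rw [hcong, ih _ (hnd.filter _), pv_filter_eq_of_nodup ks e hnd]
      have hded : PySem.List.dedup (e :: el) = e :: (PySem.List.dedup el).filter (fun y => !(y == e)) := by
        simp [PySem.Set.ofList_cons, PySem.Set.discard]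
      rw [hded]
      rw [List.filter_cons]
      have hP1 : ((PySem.List.dedup el).filter (fun y => !(y == e))).filter (fun x => decide (x ∈ ks))
          = (PySem.List.dedup el).filter (fun x => decide (x ∈ ks.filter (fun x => decide (x ≠ e)))) := by
        rw [List.filter_filter]
        apply List.filter_congr
        intro x _
        by_cases h1 : x = e <;> by_cases h2 : x ∈ ks <;> simp [List.mem_filter, h1, h2]
      have hP2 : (ks.filter (fun x => decide (x ≠ e))).filter (fun k => decide (k ∉ el))
          = ks.filter (fun k => decide (k ∉ e :: el)) := by
        rw [List.filter_filter]
        apply List.filter_congr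
        intro x _
        by_cases h1 : x = e <;> by_cases h2 : x ∈ el <;> simp [h1, h2]
      rw [hP1, hP2]
      by_cases he : e ∈ ks <;> simp [he]

-- A's inner result as a map over the characterized key order
theorem pv_sortInner_eq (el : List String) (d : List (String × Int))
    (hnd : (d.map (·.1)).Nodup) :
    pvSortInner el d
      = ((PySem.List.dedup el).filter (fun e => decide (e ∈ d.map (·.1)))
          ++ (d.map (·.1)).filter (fun k => decide (k ∉ el))).map
            (fun k => (k, PySem.Dict.getD ⟨d⟩ k 0)) := by
  unfold pvSortInner
  have hperm := PySem.List.sorted_perm (d.map (·.1)) (pvKeyA el) false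
  have hnd' : (PySem.List.sorted (d.map (·.1)) (pvKeyA el) false).Nodup := hperm.nodup_iff.mpr hnd
  have h := PySem.Dict.items_foldl_insert_fresh
    (PySem.List.sorted (d.map (·.1)) (pvKeyA el) false)
    (fun a => a) (fun a => PySem.Dict.getD ⟨d⟩ a 0) PySem.Dict.empty
    (fun a _ => PySem.Dict.contains_empty a) (by simpa using hnd')
  have hemp : (PySem.Dict.empty : PySem.Dict String Int).items = [] := rfl
  rw [hemp, List.nil_append] at h
  rw [h, pv_sorted_char el _ hnd]

-- B's first pass: the event_list keys present in a_dict, first occurrences in order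
theorem pv_r1_char (a : PySem.Dict String Int) (el : List String) :
    (el.foldl (fun (r : PySem.Dict String Int) ev =>
        if a.contains ev && !(r.contains ev) then r.insert ev (a.getD ev 0) else r)
      PySem.Dict.empty).items
      = ((PySem.List.dedup el).filter (fun e => a.contains e)).map (fun k => (k, a.getD k 0)) := by
  induction el using List.reverseRecOn with
  | nil => rfl
  | append_singleton el y ih =>
      rw [List.foldl_append]
      set r := el.foldl (fun (r : PySem.Dict String Int) ev =>
        if a.contains ev && !(r.contains ev) then r.insert ev (a.getD ev 0) else r)
        PySem.Dict.empty with hr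
      have hkeys : r.keys = (PySem.List.dedup el).filter (fun e => a.contains e) := by
        show r.items.map (·.1) = _
        rw [ih, List.map_map]
        exact List.map_id' _
      have hcont : r.contains y = decide (y ∈ el ∧ a.contains y = true) := by
        rw [PySem.Dict.contains_eq_decide_mem_keys, hkeys]
        simp [List.mem_filter]
      have hded : PySem.List.dedup (el ++ [y])
          = if y ∈ el then PySem.List.dedup el else PySem.List.dedup el ++ [y] := by
        simp only [PySem.List.dedup_eq_ofList, PySem.Set.ofList_append_singleton]
        rw [PySem.Set.add_eq_ite]
        simp [PySem.Set.mem_ofList]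
      simp only [List.foldl_cons, List.foldl_nil]
      by_cases ha : a.contains y = true
      · by_cases hy : y ∈ el
        · rw [hded, if_pos hy]
          have hb : (a.contains y && !(r.contains y)) = false := by
            rw [ha, hcont]; simp [hy, ha]
          simp only [hb, Bool.false_eq_true, if_false]
          exact ih
        · rw [hded, if_neg hy]
          have hb : (a.contains y && !(r.contains y)) = true := by
            rw [ha, hcont]; simp [hy]
          simp only [hb, if_true]
          have hnc : r.contains y = false := by rw [hcont]; simp [hy]
          rw [PySem.Dict.items_insert_of_not_contains _ _ hnc, ih, List.filter_append]
          simp [ha]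
      · have hb : (a.contains y && !(r.contains y)) = false := by
          simp [Bool.eq_false_iff.mpr ha]
        simp only [hb, Bool.false_eq_true, if_false]
        rw [ih, hded]
        by_cases hy : y ∈ el
        · rw [if_pos hy]
        · rw [if_neg hy, List.filter_append]
          simp [Bool.eq_false_iff.mpr ha]
  
-- B's second pass appends the items whose key the first pass did not place
theorem pv_r2_char (d : List (String × Int)) (r : PySem.Dict String Int)
    (hnd : (d.map (·.1)).Nodup) :
    (d.foldl (fun (r : PySem.Dict String Int) kv =>
        if !(r.contains kv.1) then r.insert kv.1 kv.2 else r) r).items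
      = r.items ++ d.filter (fun kv => !(r.contains kv.1)) := by
  induction d generalizing r with
  | nil => simp
  | cons kv rest ih =>
      simp only [List.map_cons, List.nodup_cons] at hnd
      simp only [List.foldl_cons, List.filter_cons]
      by_cases hc : r.contains kv.1 = true
      · simp only [hc, Bool.not_true, Bool.false_eq_true, if_false]
        simpa using ih r hnd.2
      · have hc' : r.contains kv.1 = false := Bool.eq_false_iff.mpr hc
        simp only [hc', Bool.not_false, if_true]
        rw [ih _ hnd.2, PySem.Dict.items_insert_of_not_contains _ _ hc']
        have hfil : rest.filter (fun p => !((r.insert kv.1 kv.2).contains p.1))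
            = rest.filter (fun p => !(r.contains p.1)) := by
          apply List.filter_congr
          intro p hp
          have hne : p.1 ≠ kv.1 := by
            intro hEq
            exact hnd.1 (hEq ▸ List.mem_map_of_mem (f := (·.1)) hp)
          rw [PySem.Dict.contains_insert]
          simp [hne]
        rw [hfil]
        simp

-- the two inner transforms agree on every dict with distinct keys
theorem pv_inner_eq (el : List String) (d : List (String × Int))
    (hnd : (d.map (·.1)).Nodup) :
    pvSortInner el d = pvScatterInner el d := by
  have hcontains : ∀ e : String, (⟨d⟩ : PySem.Dict String Int).contains e = decide (e ∈ d.map (·.1)) := by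
    intro e
    rw [PySem.Dict.contains_eq_decide_mem_keys]
    rfl
  unfold pvScatterInner
  set rD := el.foldl (fun (r : PySem.Dict String Int) ev =>
      if (⟨d⟩ : PySem.Dict String Int).contains ev && !(r.contains ev)
      then r.insert ev ((⟨d⟩ : PySem.Dict String Int).getD ev 0) else r)
    PySem.Dict.empty with hrD
  have h1 : rD.items = ((PySem.List.dedup el).filter (fun e => (⟨d⟩ : PySem.Dict String Int).contains e)).map
      (fun k => (k, PySem.Dict.getD (⟨d⟩ : PySem.Dict String Int) k 0)) := pv_r1_char _ el
  have hkeys : rD.keys = (PySem.List.dedup el).filter (fun e => (⟨d⟩ : PySem.Dict String Int).contains e) := by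
    show rD.items.map (·.1) = _
    rw [h1, List.map_map]
    exact List.map_id' _
  have hcontr1 : ∀ k : String, rD.contains k
      = (decide (k ∈ el) && (⟨d⟩ : PySem.Dict String Int).contains k) := by
    intro k
    rw [PySem.Dict.contains_eq_decide_mem_keys, hkeys]
    cases h2 : (⟨d⟩ : PySem.Dict String Int).contains k
    all_goals simp only [List.mem_filter, PySem.List.mem_dedup, h2]
    all_goals by_cases h1 : k ∈ el <;> simp [h1]
  rw [pv_r2_char d rD hnd, h1, pv_sortInner_eq el d hnd, List.map_append]
  have hflt1 : (PySem.List.dedup el).filter (fun e => decide (e ∈ d.map (·.1)))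
      = (PySem.List.dedup el).filter (fun e => (⟨d⟩ : PySem.Dict String Int).contains e) :=
    List.filter_congr (fun x _ => (hcontains x).symm)
  have hflt2 : d.filter (fun kv => !(rD.contains kv.1)) = d.filter (fun kv => decide (kv.1 ∉ el)) := by
    apply List.filter_congr
    intro kv hkv
    have hck : (⟨d⟩ : PySem.Dict String Int).contains kv.1 = true := by
      rw [hcontains]
      simp [List.mem_map_of_mem (f := (·.1)) hkv]
    rw [hcontr1, hck]
    by_cases hy : kv.1 ∈ el <;> simp [hy]
  have hmapfil : ((d.map (·.1)).filter (fun k => decide (k ∉ el))).map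
        (fun k => (k, PySem.Dict.getD (⟨d⟩ : PySem.Dict String Int) k 0))
      = d.filter (fun kv => decide (kv.1 ∉ el)) := by
    have hfilmem : ∀ kv ∈ d.filter (fun kv => decide (kv.1 ∉ el)),
        (kv.1, PySem.Dict.getD (⟨d⟩ : PySem.Dict String Int) kv.1 0) = kv := by
      intro kv hkv
      have hkd : kv ∈ d := List.mem_of_mem_filter hkv
      have hg : PySem.Dict.getD (⟨d⟩ : PySem.Dict String Int) kv.1 0 = kv.2 := by
        apply PySem.Dict.getD_of_mem_items (d := (⟨d⟩ : PySem.Dict String Int)) (k := kv.1) (v := kv.2)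
        · exact hkd
        · exact hnd
      rw [hg]
    rw [List.filter_map, List.map_map]
    calc (d.filter ((fun k => decide (k ∉ el)) ∘ (·.1))).map
          ((fun k => (k, PySem.Dict.getD (⟨d⟩ : PySem.Dict String Int) k 0)) ∘ (·.1))
        = (d.filter (fun kv => decide (kv.1 ∉ el))).map
          (fun kv => (kv.1, PySem.Dict.getD (⟨d⟩ : PySem.Dict String Int) kv.1 0)) := rfl
      _ = (d.filter (fun kv => decide (kv.1 ∉ el))).map id := List.map_congr_left hfilmem
      _ = d.filter (fun kv => decide (kv.1 ∉ el)) := List.map_id _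
  rw [hflt1, hflt2, hmapfil]

-- ===== VERDICT (by name: the statement is the Claim_ definition above) =====
theorem event_sorter_spec : Claim_equal_event_sorter := by
  intro dict_data event_list _ hpre
  unfold Spec_event_sorter event_sorter event_sorter_alt
  apply List.map_congr_left
  intro p hp
  have hp2 := (hpre.2 p hp).2
  apply congrArg
  apply List.map_congr_left
  intro q hq
  have := pv_inner_eq event_list q.2 (hp2 q hq)
  rw [this]
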